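-- pv_equiv track=rewrite | github.com/mcceTest/leetcode_py | src/X131_PalindromePartitioning.py | calcPartitionList
-- ===== SOURCE A (Python) =====
-- def calcPartitionList(s):
--     res = [ [] for _ in range(len(s))]
--     for i in range(len(s)):
--         res[i].append(i + 1)
--         left = i - 1
--         right = i + 1
--         while left >= 0 and right < len(s) and s[left] == s[right]:
--             res[left].append(right + 1)
--             left -= 1
--             right += 1
--
--     for i in range(len(s) - 1):
--         left = i
--         right = i + 1
--         while left >= 0 and right < len(s) and s[left] == s[right]:
--             res[left].append(right + 1)
--             left -= 1
--             right += 1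
--
--     return res
-- ===== SOURCE B (Python) =====
-- def calcPartitionList(s):
--     # Simpler: per start index, test each candidate substring directly (slice == reversed slice),
--     # emitting odd-length palindrome ends first, then even-length ones, as A's two passes do.
--     n = len(s)
--     res = []
--     for i in range(n):
--         row = [j + 1 for j in range(i, n, 2) if s[i:j + 1] == s[i:j + 1][::-1]]
--         row += [j + 1 for j in range(i + 1, n, 2) if s[i:j + 1] == s[i:j + 1][::-1]]
--         res.append(row)
--     return res
-- ===== Notes on version B (the rewrite author's own statement) =====
-- stated objective: simpler
-- what changed: A expands around every center, mutating earlier rows of a shared result list in two passes; B builds each row independently by testing each candidate substring directly with slice == reversed slice, emitting odd-length palindrome end positions first and then even-length ones.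
import Mathlib
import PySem

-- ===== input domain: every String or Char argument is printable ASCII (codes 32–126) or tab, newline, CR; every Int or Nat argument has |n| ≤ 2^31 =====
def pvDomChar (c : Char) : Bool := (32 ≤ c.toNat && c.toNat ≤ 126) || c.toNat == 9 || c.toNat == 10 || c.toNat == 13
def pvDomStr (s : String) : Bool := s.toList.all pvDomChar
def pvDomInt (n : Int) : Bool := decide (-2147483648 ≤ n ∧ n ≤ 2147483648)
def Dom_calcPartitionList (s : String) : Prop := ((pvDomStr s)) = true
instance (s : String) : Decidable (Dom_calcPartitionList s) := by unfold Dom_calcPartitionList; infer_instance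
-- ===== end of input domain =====

-- B replaces A's two expand-around-center passes (which mutate earlier rows) with a direct
-- per-start-index slice == reversed-slice test, emitting odd-length palindrome ends first,
-- then even-length ends, as A's two passes do (objective: simpler).

-- ===== PORT A =====
-- 'res[idx].append(v)' on a functional list of rows
def pvAppendAt (res : List (List Int)) (idx : Nat) (v : Int) : List (List Int) :=
  res.modify idx (fun row => row ++ [v])

-- the inner 'while left >= 0 and right < len(s) and s[left] == s[right]: res[left].append(right + 1); left -= 1; right += 1' loop of both passes
def pvExpand (cs : List Char) (left right : Int) (res : List (List Int)) : List (List Int) :=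
  if 0 ≤ left ∧ right < (cs.length : Int) ∧ PySem.List.pyGet? cs left = PySem.List.pyGet? cs right then
    pvExpand cs (left - 1) (right + 1) (pvAppendAt res left.toNat (right + 1))
  else res
termination_by ((cs.length : Int) - right).toNat
decreasing_by omega

def calcPartitionList (s : String) : List (List Int) :=
  let cs := s.toList
  let n := cs.length
  let res0 := List.replicate n ([] : List Int)
  let res1 := (List.range n).foldl
    (fun res (i : Nat) => pvExpand cs ((i : Int) - 1) ((i : Int) + 1) (pvAppendAt res i ((i : Int) + 1))) res0
  (List.range (n - 1)).foldl (fun res (i : Nat) => pvExpand cs (i : Int) ((i : Int) + 1) res) res1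

-- ===== PORT B =====
-- s[i:j+1] == s[i:j+1][::-1]  ([::-1] is reversal: PySem.List.slice?_none_none_neg_one)
def pvIsPal (cs : List Char) (i j : Int) : Bool :=
  let t := PySem.List.slice cs (some i) (some (j + 1))
  t == t.reverse

def calcPartitionList_alt (s : String) : List (List Int) :=
  let cs := s.toList
  let n : Int := PySem.List.len cs
  (List.range cs.length).map (fun (i : Nat) =>
    ((PySem.List.pyRange (i : Int) n 2).filter (fun j => pvIsPal cs (i : Int) j)).map (fun j => j + 1) ++
    ((PySem.List.pyRange ((i : Int) + 1) n 2).filter (fun j => pvIsPal cs (i : Int) j)).map (fun j => j + 1))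

-- ===== PRECONDITION & SPEC =====
def Spec_calcPartitionList (s : String) (out : List (List Int)) : Prop := out = calcPartitionList_alt s
instance (s : String) (out : List (List Int)) : Decidable (Spec_calcPartitionList s out) := by unfold Spec_calcPartitionList; infer_instance

-- ===== CLAIM (what is proved, stated in full; the proofs are below) =====
def Claim_equal_calcPartitionList : Prop := ∀ (s : String), Dom_calcPartitionList s → Spec_calcPartitionList s (calcPartitionList s)

-- ===== LEMMAS AND PROOFS =====

def pvG (cs : List Char) (l r : Int) : Prop :=
  0 ≤ l ∧ r < (cs.length : Int) ∧ PySem.List.pyGet? cs l = PySem.List.pyGet? cs r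

def pvK (cs : List Char) (l r : Int) : Nat :=
  if 0 ≤ l ∧ r < (cs.length : Int) ∧ PySem.List.pyGet? cs l = PySem.List.pyGet? cs r then
    pvK cs (l - 1) (r + 1) + 1
  else 0
termination_by ((cs.length : Int) - r).toNat
decreasing_by omega
def pvEvs (cs : List Char) (l r : Int) : List (Nat × Int) :=
  if 0 ≤ l ∧ r < (cs.length : Int) ∧ PySem.List.pyGet? cs l = PySem.List.pyGet? cs r then
    (l.toNat, r + 1) :: pvEvs cs (l - 1) (r + 1)
  else []
termination_by ((cs.length : Int) - r).toNat
decreasing_by omega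
def pvApply (res : List (List Int)) (evs : List (Nat × Int)) : List (List Int) :=
  evs.foldl (fun res e => pvAppendAt res e.1 e.2) res


theorem pvExpand_eq (cs : List Char) (l r : Int) (res : List (List Int)) :
    pvExpand cs l r res = pvApply res (pvEvs cs l r) := by
  fun_induction pvExpand cs l r res with
  | case1 l r res h ih =>
      rw [pvEvs, if_pos h]
      simpa [pvApply] using ih
  | case2 l r res h => rw [pvEvs, if_neg h]; rfl

theorem pvEvs_eq (cs : List Char) (l r : Int) :
    pvEvs cs l r = (List.range (pvK cs l r)).map
      (fun (k : Nat) => (((l - (k : Int)).toNat, r + (k : Int) + 1) : Nat × Int)) := by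
  fun_induction pvEvs cs l r with
  | case1 l r h ih =>
      rw [pvK, if_pos h, List.range_succ_eq_map, List.map_cons, ih]
      congr 1
      · simp
      · rw [List.map_map]
        apply List.map_congr_left
        intro k hk
        simp only [Function.comp, Nat.succ_eq_add_one, Prod.mk.injEq]
        constructor
        · congr 1; push_cast; ring
        · push_cast; ring
  | case2 l r h => rw [pvK, if_neg h]; simp

theorem pvK_lt_iff (cs : List Char) (l r : Int) (k : Nat) :
    k < pvK cs l r ↔ ∀ t : Nat, t ≤ k → pvG cs (l - t) (r + t) := by
  induction k generalizing l r with
  | zero =>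
      constructor
      · intro hlt t ht
        have ht0 : t = 0 := by omega
        subst ht0
        rw [pvK] at hlt
        by_cases h : (0 ≤ l ∧ r < (cs.length : Int) ∧ PySem.List.pyGet? cs l = PySem.List.pyGet? cs r)
        · simpa [pvG] using h
        · rw [if_neg h] at hlt; omega
      · intro hall
        have h0 := hall 0 (le_refl 0)
        simp [pvG] at h0
        rw [pvK, if_pos h0]; omega
  | succ k ih =>
      by_cases h : (0 ≤ l ∧ r < (cs.length : Int) ∧ PySem.List.pyGet? cs l = PySem.List.pyGet? cs r)
      · rw [pvK, if_pos h, Nat.succ_lt_succ_iff, ih]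
        constructor
        · intro hall t ht
          match t with
          | 0 => simpa [pvG] using h
          | Nat.succ t =>
              have htt := hall t (by omega)
              have e1 : l - ((t+1 : Nat) : Int) = l - 1 - (t : Int) := by push_cast; ring
              have e2 : r + ((t+1 : Nat) : Int) = r + 1 + (t : Int) := by push_cast; ring
              rw [e1, e2]; exact htt
        · intro hall t ht
          have htt := hall (t+1) (by omega)
          have e1 : l - 1 - (t : Int) = l - ((t+1 : Nat) : Int) := by push_cast; ring
          have e2 : r + 1 + (t : Int) = r + ((t+1 : Nat) : Int) := by push_cast; ring
          rw [e1, e2]; exact htt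
      · rw [pvK, if_neg h]
        constructor
        · omega
        · intro hall; exact absurd (by simpa [pvG] using hall 0 (by omega)) h

theorem pvApply_length (res : List (List Int)) (evs : List (Nat × Int)) :
    (pvApply res evs).length = res.length := by
  induction evs generalizing res with
  | nil => rfl
  | cons e evs ih => simp only [pvApply, List.foldl_cons] at ih ⊢; rw [ih]; simp [pvAppendAt]

theorem pvApply_getElem (res : List (List Int)) (evs : List (Nat × Int)) (i : Nat)
    (hi : i < (pvApply res evs).length) (hi' : i < res.length) :
    (pvApply res evs)[i] = res[i] ++ (evs.filter (fun e => e.1 == i)).map (·.2) := by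
  induction evs generalizing res with
  | nil => simp [pvApply]
  | cons e evs ih =>
      have hlen : (pvAppendAt res e.1 e.2).length = res.length := by simp [pvAppendAt]
      have step : pvApply res (e :: evs) = pvApply (pvAppendAt res e.1 e.2) evs := rfl
      rw [List.getElem_of_eq step]
      rw [ih (pvAppendAt res e.1 e.2) (by rw [pvApply_length]; omega) (by omega)]
      have hget : (pvAppendAt res e.1 e.2)[i]'(by omega) =
          if e.1 = i then res[i] ++ [e.2] else res[i] := by
        simp [pvAppendAt, List.getElem_modify]
      by_cases hcase : e.1 = i
      · rw [hget, if_pos hcase, List.filter_cons_of_pos (by simpa using hcase)]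
        simp
      · rw [hget, if_neg hcase, List.filter_cons_of_neg (by simpa using hcase)]

theorem pvGetIdx (l : List Char) (a b : Nat) (h : a = b) (ha : a < l.length) :
    l[a] = l[b]'(h ▸ ha) := by subst h; rfl

theorem pvG_nat (cs : List Char) (a b : Nat) :
    pvG cs (a : Int) (b : Int) ↔ (b < cs.length ∧ cs[a]? = cs[b]?) := by
  simp [pvG]

theorem pal_iff_full (cs : List Char) (i j : Nat) (hij : i ≤ j) (hj : j < cs.length) :
    pvIsPal cs i j = true ↔ (∀ k : Nat, i + k ≤ j → cs[i+k]? = cs[j-k]?) := by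
  have hcast : ((j : Int) + 1) = ((j+1 : Nat) : Int) := by push_cast; ring
  have ht : PySem.List.slice cs (some (i:Int)) (some ((j:Int)+1)) = (cs.drop i).take (j+1-i) := by
    rw [hcast, PySem.List.slice_natCast]
  simp only [pvIsPal, ht, beq_iff_eq]
  have hlen : ((cs.drop i).take (j+1-i)).length = j+1-i := by simp; omega
  have hgt : ∀ (k : Nat) (hk : k < ((cs.drop i).take (j+1-i)).length),
      ((cs.drop i).take (j+1-i))[k] = cs[i+k]'(by rw [hlen] at hk; omega) := by
    intro k hk
    simp only [List.getElem_take, List.getElem_drop]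
  constructor
  · intro heq k hk
    have h1 : i + k < cs.length := by omega
    have h2 : j - k < cs.length := by omega
    rw [List.getElem?_eq_getElem h1, List.getElem?_eq_getElem h2, Option.some_inj]
    have hkt : k < ((cs.drop i).take (j+1-i)).length := by omega
    have hstep := List.getElem_of_eq heq hkt
    rw [List.getElem_reverse] at hstep
    rw [hgt k hkt, hgt _ (by omega)] at hstep
    rw [hstep]
    have hidx : i + (((cs.drop i).take (j+1-i)).length - 1 - k) = j - k := by omega
    exact pvGetIdx _ _ _ hidx _
  · intro hfull
    apply List.ext_getElem (by simp)
    intro k h1 h2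
    rw [List.getElem_reverse, hgt k h1, hgt _ (by omega)]
    have hk : i + k ≤ j := by omega
    have := hfull k hk
    rw [List.getElem?_eq_getElem (by omega), List.getElem?_eq_getElem (by omega), Option.some_inj] at this
    rw [this]
    have hidx : j - k = i + (((cs.drop i).take (j+1-i)).length - 1 - k) := by omega
    exact pvGetIdx _ _ _ hidx _

theorem full_of_half (cs : List Char) (i j : Nat)
    (H : ∀ m : Nat, i ≤ m → 2*m ≤ i+j → cs[m]? = cs[i+j-m]?) :
    ∀ k : Nat, i+k ≤ j → cs[i+k]? = cs[j-k]? := by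
  intro k hk
  by_cases h : 2*(i+k) ≤ i+j
  · have := H (i+k) (by omega) (by omega)
    rw [show i+j-(i+k) = j-k by omega] at this
    exact this
  · have := H (j-k) (by omega) (by omega)
    rw [show i+j-(j-k) = i+k by omega] at this
    exact this.symm

theorem K_odd (cs : List Char) (i c : Nat) (hic : i < c) :
    (c - i ≤ pvK cs ((c:Int)-1) ((c:Int)+1)) ↔
      (2*c - i < cs.length ∧ ∀ k : Nat, i + k ≤ 2*c-i → cs[i+k]? = cs[(2*c-i)-k]?) := by
  have hK := pvK_lt_iff cs ((c:Int)-1) ((c:Int)+1) (c-i-1)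
  have hstep : (c - i ≤ pvK cs ((c:Int)-1) ((c:Int)+1)) ↔ (c-i-1 < pvK cs ((c:Int)-1) ((c:Int)+1)) := by omega
  rw [hstep, hK]
  have hGu : ∀ t : Nat, t ≤ c-i-1 →
      (pvG cs ((c:Int)-1-(t:Int)) ((c:Int)+1+(t:Int)) ↔ (c+1+t < cs.length ∧ cs[c-1-t]? = cs[c+1+t]?)) := by
    intro t ht
    have e1 : (c:Int)-1-(t:Int) = ((c-1-t : Nat) : Int) := by omega
    have e2 : (c:Int)+1+(t:Int) = ((c+1+t : Nat) : Int) := by push_cast; ring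
    rw [e1, e2, pvG_nat]
  constructor
  · intro hall
    have hj : 2*c - i < cs.length := by
      have := (hGu (c-i-1) (le_refl _)).mp (hall (c-i-1) (le_refl _))
      have e : c+1+(c-i-1) = 2*c-i := by omega
      omega
    refine ⟨hj, full_of_half cs i (2*c-i) ?_⟩
    intro m him h2m
    have hij : i + (2*c-i) = 2*c := by omega
    rw [hij] at h2m ⊢
    rcases Nat.eq_or_lt_of_le (show m ≤ c by omega) with he | hlt
    · rw [show 2*c-m = m by omega]
    · have ht : c - m - 1 ≤ c-i-1 := by omega
      have := (hGu (c-m-1) ht).mp (hall (c-m-1) ht)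
      rw [show c-1-(c-m-1) = m by omega, show c+1+(c-m-1) = 2*c-m by omega] at this
      exact this.2
  · rintro ⟨hj, hfull⟩ t ht
    rw [hGu t ht]
    constructor
    · omega
    · have := hfull (c-i-1-t) (by omega)
      rw [show i+(c-i-1-t) = c-1-t by omega, show 2*c-i-(c-i-1-t) = c+1+t by omega] at this
      exact this

theorem K_even (cs : List Char) (i c : Nat) (hic : i ≤ c) :
    (c - i < pvK cs (c:Int) ((c:Int)+1)) ↔
      (2*c+1-i < cs.length ∧ ∀ k : Nat, i + k ≤ 2*c+1-i → cs[i+k]? = cs[(2*c+1-i)-k]?) := by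
  rw [pvK_lt_iff]
  have hGu : ∀ t : Nat, t ≤ c-i →
      (pvG cs ((c:Int)-(t:Int)) ((c:Int)+1+(t:Int)) ↔ (c+1+t < cs.length ∧ cs[c-t]? = cs[c+1+t]?)) := by
    intro t ht
    have e1 : (c:Int)-(t:Int) = ((c-t : Nat) : Int) := by omega
    have e2 : (c:Int)+1+(t:Int) = ((c+1+t : Nat) : Int) := by push_cast; ring
    rw [e1, e2, pvG_nat]
  constructor
  · intro hall
    have hj : 2*c+1-i < cs.length := by
      have := (hGu (c-i) (le_refl _)).mp (hall (c-i) (le_refl _))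
      omega
    refine ⟨hj, full_of_half cs i (2*c+1-i) ?_⟩
    intro m him h2m
    have hij : i + (2*c+1-i) = 2*c+1 := by omega
    rw [hij] at h2m ⊢
    have hmc : m ≤ c := by omega
    have ht : c - m ≤ c-i := by omega
    have := (hGu (c-m) ht).mp (hall (c-m) ht)
    rw [show c-(c-m) = m by omega, show c+1+(c-m) = 2*c+1-m by omega] at this
    exact this.2
  · rintro ⟨hj, hfull⟩ t ht
    rw [hGu t ht]
    constructor
    · omega
    · have := hfull (c-i-t) (by omega)
      rw [show i+(c-i-t) = c-t by omega, show 2*c+1-i-(c-i-t) = c+1+t by omega] at this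
      exact this

def g1 (cs : List Char) (c : Nat) : List (Nat × Int) :=
  (c, (c:Int)+1) :: pvEvs cs ((c:Int)-1) ((c:Int)+1)

def g2 (cs : List Char) (c : Nat) : List (Nat × Int) :=
  pvEvs cs (c:Int) ((c:Int)+1)

def bOdd (cs : List Char) (i c : Nat) : List Int :=
  if i ≤ c ∧ 2*c-i < cs.length ∧ pvIsPal cs (i:Int) ((2*c-i : Nat):Int) = true
  then [2*(c:Int)-(i:Int)+1] else []

def bEven (cs : List Char) (i c : Nat) : List Int :=
  if i ≤ c ∧ 2*c+1-i < cs.length ∧ pvIsPal cs (i:Int) ((2*c+1-i : Nat):Int) = true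
  then [2*(c:Int)-(i:Int)+2] else []

theorem range_filter_int (K : Nat) (v : Int) :
    (List.range K).filter (fun (k : Nat) => decide ((k:Int) = v)) =
      if 0 ≤ v ∧ v < (K:Int) then [v.toNat] else [] := by
  induction K with
  | zero => rw [if_neg (by omega)]; rfl
  | succ K ih =>
      rw [List.range_succ, List.filter_append, ih]
      simp only [List.filter_cons, List.filter_nil]
      split_ifs <;> simp_all <;> omega

theorem pvFilterMapFlat {α : Type} (l : List α) (p : α → Bool) (f : α → Int) :
    (l.filter p).map f = l.flatMap (fun x => if p x then [f x] else []) := by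
  induction l with
  | nil => rfl
  | cons x l ih => by_cases h : p x <;> simp [h, ih]

theorem flatMap_range_shift (n i : Nat) (hin : i ≤ n) (g : Nat → List Int)
    (h0 : ∀ c, c < i → g c = []) :
    (List.range n).flatMap g = (List.range (n-i)).flatMap (fun k => g (i+k)) := by
  conv_lhs => rw [show n = i + (n-i) by omega]
  rw [List.range_add, List.flatMap_append, List.flatMap_map]
  have hnil : (List.range i).flatMap g = [] :=
    List.flatMap_eq_nil_iff.mpr (fun x hx => h0 x (List.mem_range.mp hx))
  rw [hnil, List.nil_append]

theorem flatMap_range_ext (m1 m2 : Nat) (hle : m1 ≤ m2) (g : Nat → List Int)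
    (h : ∀ k, m1 ≤ k → g k = []) :
    (List.range m2).flatMap g = (List.range m1).flatMap g := by
  conv_lhs => rw [show m2 = m1 + (m2-m1) by omega]
  rw [List.range_add, List.flatMap_append, List.flatMap_map]
  have hnil : (List.range (m2-m1)).flatMap (fun k => g (m1+k)) = [] :=
    List.flatMap_eq_nil_iff.mpr (fun x _ => h _ (by omega))
  rw [hnil, List.append_nil]

theorem evs_filter (cs : List Char) (l r : Int) (i : Nat) :
    ((pvEvs cs l r).filter (fun e => e.1 == i)).map (·.2) =
      if (i:Int) ≤ l ∧ ((l - (i:Int)).toNat < pvK cs l r) then [r + (l - (i:Int)) + 1] else [] := by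
  rw [pvEvs_eq, List.filter_map]
  rw [List.filter_congr (q := fun (k : Nat) => decide ((k:Int) = l - (i:Int)))
    (by
      intro k hk
      have hkK : k < pvK cs l r := List.mem_range.mp hk
      have hG : pvG cs (l - k) (r + k) := ((pvK_lt_iff cs l r k).mp hkK) k (le_refl k)
      have h0 : (0:Int) ≤ l - k := hG.1
      simp only [Function.comp]
      by_cases h : (l - (k:Int)).toNat = i
      · simp only [h, beq_self_eq_true]
        symm
        rw [decide_eq_true_eq]
        omega
      · have hfalse : ((l - (k:Int)).toNat == i) = false := beq_eq_false_iff_ne.mpr h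
        rw [hfalse]
        symm
        rw [decide_eq_false_iff_not]
        omega)]
  rw [range_filter_int, List.map_map]
  by_cases hc : 0 ≤ l - (i:Int) ∧ l - (i:Int) < (pvK cs l r : Int)
  · rw [if_pos hc, if_pos (by omega)]
    simp only [List.map_cons, List.map_nil, Function.comp]
    congr 2
    omega
  · rw [if_neg hc, if_neg (by omega)]
    rfl

theorem pal_single (cs : List Char) (i : Nat) (hi : i < cs.length) :
    pvIsPal cs (i:Int) ((i:Nat):Int) = true := by
  rw [pal_iff_full cs i i (le_refl i) hi]
  intro k hk
  have : k = 0 := by omega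
  subst this; rfl

theorem g1_filter (cs : List Char) (c i : Nat) (hc : c < cs.length) :
    ((g1 cs c).filter (fun e => e.1 == i)).map (·.2) = bOdd cs i c := by
  simp only [g1, List.filter_cons]
  by_cases hci : c = i
  · subst hci
    rw [if_pos (by simp)]
    simp only [List.map_cons]
    rw [evs_filter, if_neg (by rintro ⟨h1, -⟩; omega)]
    simp only [bOdd]
    rw [if_pos ⟨le_refl c, by omega, by rw [show 2*c-c = c by omega]; exact pal_single cs c hc⟩]
    show ((c:Int)+1) :: [] = [2*(c:Int)-(c:Int)+1]
    congr 1
    omega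
  · rw [if_neg (by simp; exact hci)]
    rw [evs_filter]
    by_cases hic : i < c
    · by_cases hK : ((c:Int) - 1 - (i:Int)).toNat < pvK cs ((c:Int)-1) ((c:Int)+1)
      · rw [if_pos ⟨by omega, hK⟩]
        have hodd := (K_odd cs i c hic).mp (by omega)
        simp only [bOdd]
        rw [if_pos ⟨by omega, hodd.1, (pal_iff_full cs i (2*c-i) (by omega) hodd.1).mpr hodd.2⟩]
        congr 1
        omega
      · rw [if_neg (fun h => hK h.2)]
        simp only [bOdd]
        rw [if_neg]
        rintro ⟨h1, h2, h3⟩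
        exact hK (by
          have := (K_odd cs i c hic).mpr ⟨h2, (pal_iff_full cs i (2*c-i) (by omega) h2).mp h3⟩
          omega)
    · rw [if_neg (by rintro ⟨h1, -⟩; omega)]
      simp only [bOdd]
      rw [if_neg (by rintro ⟨h1, -, -⟩; omega)]

theorem g2_filter (cs : List Char) (c i : Nat) :
    ((g2 cs c).filter (fun e => e.1 == i)).map (·.2) = bEven cs i c := by
  simp only [g2]
  rw [evs_filter]
  by_cases hic : i ≤ c
  · by_cases hK : ((c:Int) - (i:Int)).toNat < pvK cs (c:Int) ((c:Int)+1)
    · rw [if_pos ⟨by omega, hK⟩]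
      have heven := (K_even cs i c hic).mp (by omega)
      simp only [bEven]
      rw [if_pos ⟨hic, heven.1, (pal_iff_full cs i (2*c+1-i) (by omega) heven.1).mpr heven.2⟩]
      congr 1
      omega
    · rw [if_neg (fun h => hK h.2)]
      simp only [bEven]
      rw [if_neg]
      rintro ⟨h1, h2, h3⟩
      exact hK (by
        have := (K_even cs i c hic).mpr ⟨h2, (pal_iff_full cs i (2*c+1-i) (by omega) h2).mp h3⟩
        omega)
  · rw [if_neg (by rintro ⟨h1, -⟩; omega)]
    simp only [bEven]
    rw [if_neg (by rintro ⟨h1, -, -⟩; omega)]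

theorem bOdd_nil_of_lt (cs : List Char) (i c : Nat) (h : c < i) : bOdd cs i c = [] := by
  simp only [bOdd]; rw [if_neg]; rintro ⟨h1, -, -⟩; omega

theorem bEven_nil_of_lt (cs : List Char) (i c : Nat) (h : c < i) : bEven cs i c = [] := by
  simp only [bEven]; rw [if_neg]; rintro ⟨h1, -, -⟩; omega

theorem odd_row (cs : List Char) (i : Nat) (hi : i < cs.length) :
    (List.range cs.length).flatMap (fun c => bOdd cs i c) =
      ((PySem.List.pyRange (i:Int) ((cs.length:Nat):Int) 2).filter (fun j => pvIsPal cs (i:Int) j)).map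
        (fun j => j + 1) := by
  rw [pvFilterMapFlat, PySem.List.pyRange_of_pos _ _ (by norm_num : (0:Int) < 2), List.flatMap_map]
  rw [if_pos (show (i:Int) < ((cs.length:Nat):Int) from by exact_mod_cast hi)]
  set K := ((((cs.length:Nat):Int) - (i:Int) + 2 - 1)/2).toNat with hK
  have hKle : K ≤ cs.length - i := by omega
  rw [flatMap_range_shift cs.length i (le_of_lt hi) _ (fun c hc => bOdd_nil_of_lt cs i c hc)]
  rw [flatMap_range_ext K (cs.length - i) hKle _ (fun k hk => by
      simp only [bOdd]; rw [if_neg]; rintro ⟨-, h2, -⟩; omega)]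
  apply List.flatMap_congr
  intro k hk
  have hkK : k < K := List.mem_range.mp hk
  have hkn : i + 2*k < cs.length := by omega
  have harg : ((2*(i+k)-i : Nat) : Int) = (i:Int) + 2*(k:Int) := by omega
  simp only [bOdd]
  by_cases hp : pvIsPal cs (i:Int) ((i:Int) + 2*(k:Int)) = true
  · rw [if_pos ⟨by omega, by omega, by rw [harg]; exact hp⟩, if_pos hp]
    congr 1
    omega
  · rw [if_neg, if_neg hp]
    rintro ⟨-, -, h3⟩
    exact hp (by rw [← harg]; exact h3)

theorem even_row (cs : List Char) (i : Nat) (hi : i < cs.length) :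
    (List.range (cs.length - 1)).flatMap (fun c => bEven cs i c) =
      ((PySem.List.pyRange ((i:Int)+1) ((cs.length:Nat):Int) 2).filter (fun j => pvIsPal cs (i:Int) j)).map
        (fun j => j + 1) := by
  rw [pvFilterMapFlat, PySem.List.pyRange_of_pos _ _ (by norm_num : (0:Int) < 2), List.flatMap_map]
  by_cases hin : (i:Int)+1 < ((cs.length:Nat):Int)
  · rw [if_pos hin]
    set K := ((((cs.length:Nat):Int) - ((i:Int)+1) + 2 - 1)/2).toNat with hK
    have hKle : K ≤ cs.length - 1 - i := by omega
    rw [flatMap_range_shift (cs.length - 1) i (by omega) _ (fun c hc => bEven_nil_of_lt cs i c hc)]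
    rw [flatMap_range_ext K (cs.length - 1 - i) hKle _ (fun k hk => by
        simp only [bEven]; rw [if_neg]; rintro ⟨-, h2, -⟩; omega)]
    apply List.flatMap_congr
    intro k hk
    have hkK : k < K := List.mem_range.mp hk
    have hkn : i + 2*k + 1 < cs.length := by omega
    have harg : ((2*(i+k)+1-i : Nat) : Int) = (i:Int) + 1 + 2*(k:Int) := by omega
    simp only [bEven]
    by_cases hp : pvIsPal cs (i:Int) ((i:Int) + 1 + 2*(k:Int)) = true
    · rw [if_pos ⟨by omega, by omega, by rw [harg]; exact hp⟩, if_pos hp]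
      congr 1
      omega
    · rw [if_neg, if_neg hp]
      rintro ⟨-, -, h3⟩
      exact hp (by rw [← harg]; exact h3)
  · rw [if_neg hin]
    simp only [List.range_zero, List.flatMap_nil]
    exact List.flatMap_eq_nil_iff.mpr
      (fun c hc => bEven_nil_of_lt cs i c (by have := List.mem_range.mp hc; omega))
theorem pvApply_append (res : List (List Int)) (e1 e2 : List (Nat × Int)) :
    pvApply res (e1 ++ e2) = pvApply (pvApply res e1) e2 := by
  simp [pvApply]

theorem calcA (s : String) :
    calcPartitionList s = pvApply (List.replicate s.toList.length [])
      ((List.range s.toList.length).flatMap (g1 s.toList) ++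
       (List.range (s.toList.length - 1)).flatMap (g2 s.toList)) := by
  unfold calcPartitionList
  have hf1 : ∀ (res : List (List Int)) (i : Nat),
      pvExpand s.toList ((i:Int)-1) ((i:Int)+1) (pvAppendAt res i ((i:Int)+1)) = pvApply res (g1 s.toList i) := by
    intro res i
    rw [pvExpand_eq]
    rfl
  have hf2 : ∀ (res : List (List Int)) (i : Nat),
      pvExpand s.toList (i:Int) ((i:Int)+1) res = pvApply res (g2 s.toList i) := by
    intro res i
    rw [pvExpand_eq]
    rfl
  simp only [hf1, hf2]
  have hfold : ∀ (g : Nat → List (Nat × Int)) (l : List Nat) (init : List (List Int)),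
      l.foldl (fun res c => pvApply res (g c)) init = pvApply init (l.flatMap g) := by
    intro g l
    induction l with
    | nil => intro init; rfl
    | cons c l ih =>
        intro init
        simp only [List.foldl_cons, List.flatMap_cons, pvApply_append]
        exact ih _
  rw [hfold, hfold, ← pvApply_append]

theorem main_eq (s : String) : calcPartitionList s = calcPartitionList_alt s := by
  rw [calcA]
  have hB : calcPartitionList_alt s = (List.range s.toList.length).map (fun (i : Nat) =>
      ((PySem.List.pyRange (i:Int) ((s.toList.length:Nat):Int) 2).filter
        (fun j => pvIsPal s.toList (i:Int) j)).map (fun j => j + 1) ++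
      ((PySem.List.pyRange ((i:Int)+1) ((s.toList.length:Nat):Int) 2).filter
        (fun j => pvIsPal s.toList (i:Int) j)).map (fun j => j + 1)) := by
    simp only [calcPartitionList_alt, PySem.List.len_eq]
  rw [hB]
  apply List.ext_getElem
  · rw [pvApply_length]; simp
  · intro i h1 h2
    have hin : i < s.toList.length := by
      rw [pvApply_length] at h1; simpa using h1
    rw [pvApply_getElem _ _ i h1 (by simpa using hin)]
    rw [List.getElem_replicate, List.nil_append, List.filter_append, List.map_append]
    rw [List.filter_flatMap, List.filter_flatMap, List.map_flatMap, List.map_flatMap]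
    rw [List.flatMap_congr (fun c hc => g1_filter s.toList c i (List.mem_range.mp hc))]
    rw [List.flatMap_congr (fun c hc => g2_filter s.toList c i)]
    rw [odd_row s.toList i hin, even_row s.toList i hin]
    rw [List.getElem_map, List.getElem_range]

-- ===== VERDICT (by name: the statement is the Claim_ definition above) =====
theorem calcPartitionList_spec : Claim_equal_calcPartitionList := by
  intro s _
  unfold Spec_calcPartitionList
  exact main_eq s
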